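-- pv_equiv track=rewrite | github.com/lenertovalucie/python_projects | hackathon/cv_parser.py | separate_section
-- ===== SOURCE A (Python) =====
-- def other_section_detected(line):
--     keywordsEducation = ["Education", "University", "Qualification", "Training", "Courses"]
--     keywordsWork = ["Experience", "Positions", "Work", "Job", "Professional", "Profession"]
--     keywordsOther = ["Publications", "Skills", "Reference"]
--
--     for k in keywordsEducation:
--         if k.lower() in line.lower():
--             return "Education"
--
--     for k in keywordsWork:
--         if k.lower() in line.lower():
--             return "Work"
--
--     for k in keywordsOther:
--         if k.lower() in line.lower():
--             return "Other"
--
--     return False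
--
-- def separate_section(text):
--     lines = text.splitlines()
--     sections = {}
--     currentSectionName = "ContactInformation"
--     currentSectionContent = ""
--
--     for line in lines:
--         if (other_section_detected(line)):
--             if currentSectionName in sections:
--                 sections[currentSectionName] += currentSectionContent
--             else:
--                 sections[currentSectionName] = currentSectionContent
--             currentSectionContent = ""
--             currentSectionName = other_section_detected(line)
--             currentSectionContent += line + "\n"
--         else:
--             currentSectionContent += line + "\n"
--
--     return sections
-- ===== SOURCE B (Python) =====
-- def other_section_detected(line):
--     keywordsEducation = ["Education", "University", "Qualification", "Training", "Courses"]
--     keywordsWork = ["Experience", "Positions", "Work", "Job", "Professional", "Profession"]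
--     keywordsOther = ["Publications", "Skills", "Reference"]
--
--     for k in keywordsEducation:
--         if k.lower() in line.lower():
--             return "Education"
--
--     for k in keywordsWork:
--         if k.lower() in line.lower():
--             return "Work"
--
--     for k in keywordsOther:
--         if k.lower() in line.lower():
--             return "Other"
--
--     return False
--
-- def separate_section(text):
--     # Pass 1: group the lines into (section-name, lines) segments at keyword lines.
--     groups = []
--     cur_name, cur_lines = "ContactInformation", []
--     for line in text.splitlines():
--         name = other_section_detected(line)
--         if name:
--             groups.append((cur_name, cur_lines))
--             cur_name, cur_lines = name, [line]
--         else: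
--             cur_lines = cur_lines + [line]
--     # The trailing segment (cur_name, cur_lines) is never emitted, as in the original.
--     # Pass 2: build the dict, accumulating repeated section names.
--     sections = {}
--     for name, seg in groups:
--         sections[name] = sections.get(name, "") + "".join(l + "\n" for l in seg)
--     return sections
-- ===== Notes on version B (the rewrite author's own statement) =====
-- stated objective: alternative
-- what changed: B replaces A's single interleaved loop (which mutates the dict and a growing content string at every keyword line) by two passes: one pass grouping the lines into (section-name, lines) segments at keyword boundaries (calling other_section_detected once per line instead of twice), then a separate pass that joins each segment and folds the segments into the dict with get()-based accumulation; like A, the trailing segment is never emitted.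
import Mathlib
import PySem

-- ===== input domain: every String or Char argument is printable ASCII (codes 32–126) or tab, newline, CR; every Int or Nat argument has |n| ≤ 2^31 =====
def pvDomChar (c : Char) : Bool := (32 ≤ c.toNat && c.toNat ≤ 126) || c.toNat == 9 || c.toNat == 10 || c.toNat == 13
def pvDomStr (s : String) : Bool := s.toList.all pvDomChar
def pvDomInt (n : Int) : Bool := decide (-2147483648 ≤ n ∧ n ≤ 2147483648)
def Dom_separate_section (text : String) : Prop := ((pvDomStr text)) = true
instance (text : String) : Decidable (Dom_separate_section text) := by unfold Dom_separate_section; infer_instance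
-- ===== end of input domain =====

-- B: two-pass re-implementation — group lines into (section, lines) segments, then fold the
-- segments into the dict (same return value as A, including A's dropping of the trailing segment).


-- ===== PORT A =====
-- other_section_detected returns a section name (truthy string) or False → Option String
def other_section_detected (line : String) : Option String :=
  let keywordsEducation := ["Education", "University", "Qualification", "Training", "Courses"]
  let keywordsWork := ["Experience", "Positions", "Work", "Job", "Professional", "Profession"]
  let keywordsOther := ["Publications", "Skills", "Reference"]
  if keywordsEducation.any (fun k => PySem.Str.isIn (PySem.Str.lower k) (PySem.Str.lower line)) then
    some "Education"
  else if keywordsWork.any (fun k => PySem.Str.isIn (PySem.Str.lower k) (PySem.Str.lower line)) then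
    some "Work"
  else if keywordsOther.any (fun k => PySem.Str.isIn (PySem.Str.lower k) (PySem.Str.lower line)) then
    some "Other"
  else
    none

def separate_section (text : String) : List (String × String) :=
  let lines := PySem.Str.splitlines text
  let st := lines.foldl
    (fun (st : PySem.Dict String String × String × String) line =>
      let (sections, currentSectionName, currentSectionContent) := st
      match other_section_detected line with
      | some newName =>
          let sections :=
            if sections.contains currentSectionName then
              sections.insert currentSectionName
                (sections.getD currentSectionName "" ++ currentSectionContent)
            else
              sections.insert currentSectionName currentSectionContent
          (sections, newName, "" ++ line ++ "\n")
      | none =>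
          (sections, currentSectionName, currentSectionContent ++ line ++ "\n"))
    (PySem.Dict.empty, "ContactInformation", "")
  st.1.items

-- ===== PORT B =====
-- pass 1 of Source B: group the lines into (section-name, lines) segments at keyword lines;
-- the trailing segment is never emitted, as in the original
def pvGroupStep (st : List (String × List String) × String × List String) (line : String) :
    List (String × List String) × String × List String :=
  let (groups, curName, curLines) := st
  match other_section_detected line with
  | some name => (groups ++ [(curName, curLines)], name, [line])
  | none => (groups, curName, curLines ++ [line])

-- pass 2 of Source B: sections[name] = sections.get(name, "") + "".join(l + "\n" for l in seg)
def pvDictStep (sections : PySem.Dict String String) (g : String × List String) :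
    PySem.Dict String String :=
  sections.insert g.1
    (sections.getD g.1 "" ++ PySem.Str.join "" (g.2.map (fun l => l ++ "\n")))

def separate_section_alt (text : String) : List (String × String) :=
  let st := (PySem.Str.splitlines text).foldl pvGroupStep ([], "ContactInformation", [])
  (st.1.foldl pvDictStep PySem.Dict.empty).items

-- ===== PRECONDITION & SPEC =====
def Spec_separate_section (text : String) (out : List (String × String)) : Prop := out = separate_section_alt text
instance (text : String) (out : List (String × String)) : Decidable (Spec_separate_section text out) := by unfold Spec_separate_section; infer_instance

-- ===== CLAIM (what is proved, stated in full; the proofs are below) =====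
def Claim_equal_separate_section : Prop := ∀ (text : String), Dom_separate_section text → Spec_separate_section text (separate_section text)

-- ===== LEMMAS AND PROOFS =====

-- the rendered content of a list of pending lines, as pass 2 of B builds it
def pvRender (cur : List String) : String :=
  PySem.Str.join "" (cur.map (fun l => l ++ "\n"))

def pvStepA (st : PySem.Dict String String × String × String) (line : String) :
    PySem.Dict String String × String × String :=
  let (sections, currentSectionName, currentSectionContent) := st
  match other_section_detected line with
  | some newName =>
      let sections :=
        if sections.contains currentSectionName then
          sections.insert currentSectionName
            (sections.getD currentSectionName "" ++ currentSectionContent)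
        else
          sections.insert currentSectionName currentSectionContent
      (sections, newName, "" ++ line ++ "\n")
  | none =>
      (sections, currentSectionName, currentSectionContent ++ line ++ "\n")

lemma sepA_eq_foldl (text : String) :
    separate_section text =
      ((PySem.Str.splitlines text).foldl pvStepA
        (PySem.Dict.empty, "ContactInformation", "")).1.items := rfl

lemma pvRender_nil : pvRender [] = "" := by decide

lemma join_empty_sep (parts : List (List Char)) : PySem.Chars.join [] parts = parts.flatten := by
  induction parts with
  | nil => rfl
  | cons a rest ih =>
      cases rest with
      | nil => simp [PySem.Chars.join, List.intercalate, List.intersperse]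
      | cons b bs => simp_all [PySem.Chars.join, List.intercalate, List.intersperse]

lemma pvRender_append (cur : List String) (l : String) :
    pvRender (cur ++ [l]) = pvRender cur ++ l ++ "\n" := by
  simp [pvRender, PySem.Str.join, join_empty_sep, List.flatten_append, String.append_assoc]

-- the dict A's boundary branch produces equals B's unconditional pass-2 update
lemma flush_eq (d : PySem.Dict String String) (name content : String) :
    (if d.contains name then d.insert name (d.getD name "" ++ content)
     else d.insert name content) =
    d.insert name (d.getD name "" ++ content) := by
  by_cases h : d.contains name = true
  · simp [h]
  · have h' : d.contains name = false := by simpa using h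
    simp [h', PySem.Dict.getD_of_not_contains]

-- B's grouping fold only appends to the groups component
lemma foldB_groups (ls : List String) (g : List (String × List String))
    (name : String) (cur : List String) :
    ls.foldl pvGroupStep (g, name, cur) =
      (g ++ (ls.foldl pvGroupStep ([], name, cur)).1,
       (ls.foldl pvGroupStep ([], name, cur)).2) := by
  induction ls generalizing g name cur with
  | nil => simp
  | cons l ls ih =>
      simp only [List.foldl_cons, pvGroupStep]
      cases h : other_section_detected l with
      | some n =>
          simp only [List.nil_append]
          rw [ih (g ++ [(name, cur)]) n [l], ih [(name, cur)] n [l]]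
          simp
      | none => exact ih g name (cur ++ [l])

-- main invariant: A's interleaved loop = B's grouping fold followed by the dict pass
lemma key_lemma (ls : List String) (d : PySem.Dict String String)
    (name : String) (cur : List String) :
    (ls.foldl pvStepA (d, name, pvRender cur)).1 =
      (ls.foldl pvGroupStep ([], name, cur)).1.foldl pvDictStep d := by
  induction ls generalizing d name cur with
  | nil => simp
  | cons l ls ih =>
      simp only [List.foldl_cons, pvStepA, pvGroupStep]
      cases h : other_section_detected l with
      | some n =>
          simp only [List.nil_append]
          have hl : "" ++ l ++ "\n" = pvRender [l] := by
            simp [pvRender, PySem.Str.join]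
          rw [hl, ih _ n [l], foldB_groups ls [(name, cur)] n [l]]
          show _ = List.foldl pvDictStep (pvDictStep d (name, cur)) _
          rw [show pvDictStep d (name, cur) = _ from rfl, flush_eq]
          rfl
      | none =>
          rw [← pvRender_append, ih d name (cur ++ [l])]

-- ===== VERDICT (by name: the statement is the Claim_ definition above) =====
theorem separate_section_spec : Claim_equal_separate_section := by
  intro text _
  unfold Spec_separate_section separate_section_alt
  rw [sepA_eq_foldl]
  have := key_lemma (PySem.Str.splitlines text) PySem.Dict.empty "ContactInformation" []
  rw [pvRender_nil] at this
  simp only [this]
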